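-- pv_equiv track=rewrite | github.com/reverberation99/queuedeck | app/clients/radarr.py | _norm_title
-- ===== SOURCE A (Python) =====
-- def _norm_title(s: str) -> str:
--     s = (s or "").strip().lower()
--     out = []
--     for ch in s:
--         if ch.isalnum():
--             out.append(ch)
--         else:
--             out.append(" ")
--     return " ".join("".join(out).split())
-- ===== SOURCE B (Python) =====
-- def _norm_title(s: str) -> str:
--     s = (s or "").strip().lower()
--     words = []
--     i, n = 0, len(s)
--     while i < n:
--         if s[i].isalnum():
--             j = i + 1
--             while j < n and s[j].isalnum():
--                 j += 1
--             words.append(s[i:j])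
--             i = j
--         else:
--             i += 1
--     return " ".join(words)
-- ===== Notes on version B (the rewrite author's own statement) =====
-- stated objective: alternative
-- what changed: Instead of mapping every non-alphanumeric character to a space and then re-splitting the whole string, B scans the string once with an index, extracting each maximal run of alphanumeric characters directly as a word and joining them.
import Mathlib
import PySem

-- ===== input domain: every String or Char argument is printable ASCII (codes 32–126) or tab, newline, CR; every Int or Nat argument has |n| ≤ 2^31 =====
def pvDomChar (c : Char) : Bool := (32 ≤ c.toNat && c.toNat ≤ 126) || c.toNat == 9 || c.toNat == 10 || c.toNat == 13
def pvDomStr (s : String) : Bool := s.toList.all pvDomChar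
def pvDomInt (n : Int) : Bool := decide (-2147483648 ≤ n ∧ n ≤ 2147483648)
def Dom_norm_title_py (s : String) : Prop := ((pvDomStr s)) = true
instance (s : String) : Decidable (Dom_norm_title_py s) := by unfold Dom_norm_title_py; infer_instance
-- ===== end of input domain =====

-- B replaces A's map-to-spaces-then-resplit pipeline with a single scan that
-- extracts maximal alphanumeric runs directly (alternative decomposition, same cost).


-- ===== PORT A =====
-- s = (s or "").strip().lower(); loop appending ch or ' '; " ".join("".join(out).split())
def norm_title_py (s : String) : String :=
  let s1 : List Char := PySem.Chars.lower (PySem.Chars.strip s.toList)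
  let out : List Char :=
    s1.foldl (fun acc ch => if PySem.Chars.isalnum ch then acc ++ [ch] else acc ++ [' ']) []
  String.mk (PySem.Chars.join [' '] (PySem.Chars.split₀ out))

-- ===== PORT B =====
-- Source B's index scan: at an alphanumeric char, the inner while walks to the end of the
-- run (= takeWhile), the run is appended as a word and the scan resumes after it
-- (= dropWhile); at any other char the index just advances.
def normTitleAltWords : List Char → List (List Char)
  | [] => []
  | c :: rest =>
    if PySem.Chars.isalnum c then
      (c :: rest.takeWhile PySem.Chars.isalnum) :: normTitleAltWords (rest.dropWhile PySem.Chars.isalnum)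
    else normTitleAltWords rest
termination_by cs => cs.length
decreasing_by
  · simpa using Nat.lt_succ_of_le (List.length_dropWhile_le _ _)
  · simp

def norm_title_py_alt (s : String) : String :=
  let s1 : List Char := PySem.Chars.lower (PySem.Chars.strip s.toList)
  String.mk (PySem.Chars.join [' '] (normTitleAltWords s1))

-- ===== PRECONDITION & SPEC =====
def Spec_norm_title_py (s : String) (out : String) : Prop := out = norm_title_py_alt s
instance (s : String) (out : String) : Decidable (Spec_norm_title_py s out) := by unfold Spec_norm_title_py; infer_instance

-- ===== CLAIM (what is proved, stated in full; the proofs are below) =====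
def Claim_equal_norm_title_py : Prop := ∀ (s : String), Dom_norm_title_py s → Spec_norm_title_py s (norm_title_py s)

-- ===== LEMMAS AND PROOFS =====

/-- A's per-character replacement. -/
def normTitleF (c : Char) : Char := if PySem.Chars.isalnum c then c else ' '

theorem normTitle_foldl_eq_map (cs : List Char) (acc : List Char) :
    cs.foldl (fun acc ch => if PySem.Chars.isalnum ch then acc ++ [ch] else acc ++ [' ']) acc
      = acc ++ cs.map normTitleF := by
  induction cs generalizing acc with
  | nil => simp
  | cons c cs ih =>
    simp only [List.foldl_cons, List.map_cons, ih, normTitleF]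
    split_ifs <;> simp

theorem isalnum_isspace_false {c : Char} (h : PySem.Chars.isalnum c = true) :
    PySem.Chars.isspace c = false := by
  simp only [PySem.Chars.isalnum, PySem.Chars.isalpha, PySem.Chars.isupper,
    PySem.Chars.islower, PySem.Chars.isdigit, Bool.or_eq_true, Bool.and_eq_true,
    decide_eq_true_eq, Char.le_def, UInt32.le_iff_toNat_le,
    show ('A':Char).val.toNat = 65 from rfl, show ('Z':Char).val.toNat = 90 from rfl,
    show ('a':Char).val.toNat = 97 from rfl, show ('z':Char).val.toNat = 122 from rfl,
    show ('0':Char).val.toNat = 48 from rfl, show ('9':Char).val.toNat = 57 from rfl] at h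
  simp only [PySem.Chars.isspace, Bool.or_eq_false_iff, Bool.and_eq_false_iff,
    decide_eq_false_iff_not, Char.toNat]
  omega

theorem normTitle_go_run (r xs cur : List Char) (acc : List (List Char))
    (hr : ∀ x ∈ r, PySem.Chars.isalnum x = true) :
    PySem.Chars.split₀.go (r ++ xs) cur acc
      = PySem.Chars.split₀.go xs (r.reverse ++ cur) acc := by
  induction r generalizing cur with
  | nil => simp
  | cons x r ih =>
    have hx : PySem.Chars.isspace x = false :=
      isalnum_isspace_false (hr x (by simp))
    simp only [List.cons_append, PySem.Chars.split₀.go, hx, Bool.false_eq_true,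
      if_false, List.reverse_cons]
    rw [ih _ (fun y hy => hr y (by simp [hy]))]
    simp

theorem normTitle_go_map (n : Nat) (cs : List Char) (acc : List (List Char))
    (hn : cs.length ≤ n) :
    PySem.Chars.split₀.go (cs.map normTitleF) [] acc
      = acc.reverse ++ normTitleAltWords cs := by
  induction n generalizing cs acc with
  | zero =>
    have : cs = [] := List.length_eq_zero_iff.mp (Nat.le_zero.mp hn)
    subst this
    simp [PySem.Chars.split₀.go, normTitleAltWords]
  | succ n ih =>
    match cs with
    | [] => simp [PySem.Chars.split₀.go, normTitleAltWords]
    | c :: rest =>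
      by_cases hc : PySem.Chars.isalnum c = true
      · -- run case
        have hfc : normTitleF c = c := by simp [normTitleF, hc]
        have hcs : PySem.Chars.isspace c = false := isalnum_isspace_false hc
        have hsplit : rest = rest.takeWhile PySem.Chars.isalnum
            ++ rest.dropWhile PySem.Chars.isalnum := (List.takeWhile_append_dropWhile).symm
        set r := rest.takeWhile PySem.Chars.isalnum with hr
        set rest' := rest.dropWhile PySem.Chars.isalnum with hrest'
        have hrall : ∀ x ∈ r, PySem.Chars.isalnum x = true := fun x hx =>
          List.mem_takeWhile_imp hx
        have hmapr : r.map normTitleF = r := by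
          conv_rhs => rw [← List.map_id r]
          exact List.map_congr_left (fun x hx => by simp [normTitleF, hrall x hx])
        simp only [List.map_cons, hfc, PySem.Chars.split₀.go, hcs, Bool.false_eq_true,
          if_false]
        rw [hsplit, List.map_append, hmapr, normTitle_go_run r _ [c] acc hrall]
        have hlen : rest'.length ≤ n := by
          have h1 : rest'.length ≤ rest.length := List.length_dropWhile_le _ _
          simp only [List.length_cons] at hn
          omega
        match hrest'' : rest' with
        | [] =>
          simp only [List.map_nil, PySem.Chars.split₀.go]
          have : ((r.reverse ++ [c]).isEmpty) = false := by simp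
          simp only [this, Bool.false_eq_true, if_false]
          have hrr : rest = r := by simpa using hsplit
          have hdrop : List.dropWhile PySem.Chars.isalnum r = [] := by
            rw [← hrr]; exact hrest'.symm
          have htake : List.takeWhile PySem.Chars.isalnum r = r := by
            rw [← hrr, ← hr]; exact hrr.symm
          have haw : normTitleAltWords (c :: r) = [c :: r] := by
            rw [normTitleAltWords]
            simp [hc, htake, hdrop, normTitleAltWords]
          simp [haw]
        | d :: rest'' =>
          have hd : PySem.Chars.isalnum d = false := by
            have h2 := List.head?_dropWhile_not PySem.Chars.isalnum rest
            rw [← hrest'] at h2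
            simpa using h2
          have hfd : normTitleF d = ' ' := by simp [normTitleF, hd]
          simp only [List.map_cons, hfd, PySem.Chars.split₀.go]
          have hsp : PySem.Chars.isspace ' ' = true := by decide
          have hne : ((r.reverse ++ [c]).isEmpty) = false := by simp
          simp only [hsp, if_true, hne, Bool.false_eq_true, if_false]
          rw [ih rest'' ((r.reverse ++ [c]).reverse :: acc) (by
            simp only [List.length_cons] at hlen; omega)]
          have haw : normTitleAltWords (c :: rest) = (c :: r) :: normTitleAltWords rest'' := by
            rw [normTitleAltWords]
            simp only [hc, if_true, ← hr, ← hrest']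
            rw [normTitleAltWords]
            simp [hd]
          simp [← hsplit, haw]
      · -- non-alphanumeric head
        have hfc : normTitleF c = ' ' := by simp [normTitleF, hc]
        have hsp : PySem.Chars.isspace ' ' = true := by decide
        simp only [List.map_cons, hfc, PySem.Chars.split₀.go, hsp, if_true,
          List.isEmpty_nil, if_true]
        rw [ih rest acc (by simp only [List.length_cons] at hn; omega)]
        have haw : normTitleAltWords (c :: rest) = normTitleAltWords rest := by
          rw [normTitleAltWords]; simp [hc]
        rw [haw]

theorem normTitle_split₀_map (cs : List Char) :
    PySem.Chars.split₀ (cs.map normTitleF) = normTitleAltWords cs := by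
  have := normTitle_go_map cs.length cs [] (le_refl _)
  simpa [PySem.Chars.split₀] using this

-- ===== VERDICT (by name: the statement is the Claim_ definition above) =====
theorem norm_title_py_spec : Claim_equal_norm_title_py := by
  intro s _
  simp only [Spec_norm_title_py, norm_title_py, norm_title_py_alt]
  rw [normTitle_foldl_eq_map, List.nil_append, normTitle_split₀_map]
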